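-- pv_equiv track=rewrite | github.com/JetSimon/Advent-of-Code-2020 | Solutions/Day 17/day17.py | GetVariations2
-- ===== SOURCE A (Python) =====
-- import itertools
--
-- def GetVariations2(coord):
--   out =[]
--
--   adders = list(itertools.product([0, 1], repeat=4))
--
--   for i in range(0, len(adders)):
--     adder = adders[i]
--
--     #0000
--     out.append((coord[0] - adder[0], coord[1] - adder[1], coord[2] - adder[2], coord[3] - adder[3]))
--
--     #1111
--     out.append((coord[0] + adder[0], coord[1] + adder[1], coord[2] + adder[2], coord[3] + adder[3]))
--
--     #0111, 1011, 1101, 1110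
--     out.append((coord[0] - adder[0], coord[1] + adder[1], coord[2] + adder[2], coord[3] + adder[3]))
--     out.append((coord[0] + adder[0], coord[1] - adder[1], coord[2] + adder[2], coord[3] + adder[3]))
--     out.append((coord[0] + adder[0], coord[1] + adder[1], coord[2] - adder[2], coord[3] + adder[3]))
--     out.append((coord[0] + adder[0], coord[1] + adder[1], coord[2] + adder[2], coord[3] - adder[3]))
--
--     #0011, 1001, 1100, 0110
--     out.append((coord[0] - adder[0], coord[1] - adder[1], coord[2] + adder[2], coord[3] + adder[3]))
--     out.append((coord[0] + adder[0], coord[1] - adder[1], coord[2] - adder[2], coord[3] + adder[3]))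
--     out.append((coord[0] + adder[0], coord[1] + adder[1], coord[2] - adder[2], coord[3] - adder[3]))
--     out.append((coord[0] - adder[0], coord[1] + adder[1], coord[2] + adder[2], coord[3] - adder[3]))
--
--     #0101, 1010
--     out.append((coord[0] - adder[0], coord[1] + adder[1], coord[2] - adder[2], coord[3] + adder[3]))
--     out.append((coord[0] + adder[0], coord[1] - adder[1], coord[2] + adder[2], coord[3] - adder[3]))
--
--     #0001, 0010, 0100, 1000
--     out.append((coord[0] - adder[0], coord[1] - adder[1], coord[2] - adder[2], coord[3] + adder[3]))
--     out.append((coord[0] - adder[0], coord[1] - adder[1], coord[2] + adder[2], coord[3] - adder[3]))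
--     out.append((coord[0] - adder[0], coord[1] + adder[1], coord[2] - adder[2], coord[3] - adder[3]))
--     out.append((coord[0] + adder[0], coord[1] - adder[1], coord[2] - adder[2], coord[3] - adder[3]))
--
--
--   out = list(set(out))
--
--   return out
-- ===== SOURCE B (Python) =====
-- import itertools
--
-- def GetVariations2(coord):
--   return list({(coord[0] + a, coord[1] + b, coord[2] + c, coord[3] + d)
--                for a, b, c, d in itertools.product((-1, 0, 1), repeat=4)})
-- ===== Notes on version B (the rewrite author's own statement) =====
-- stated objective: simpler
-- what changed: B enumerates the 81 neighbor offsets directly as itertools.product((-1,0,1), repeat=4) in one comprehension, instead of A's 16 hand-written sign patterns applied to each of 16 {0,1}-adders (256 appends) followed by dedup; the returned collection is the same set of coordinates (the list order of list(set(...)) is hash order in both).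
import Mathlib
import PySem

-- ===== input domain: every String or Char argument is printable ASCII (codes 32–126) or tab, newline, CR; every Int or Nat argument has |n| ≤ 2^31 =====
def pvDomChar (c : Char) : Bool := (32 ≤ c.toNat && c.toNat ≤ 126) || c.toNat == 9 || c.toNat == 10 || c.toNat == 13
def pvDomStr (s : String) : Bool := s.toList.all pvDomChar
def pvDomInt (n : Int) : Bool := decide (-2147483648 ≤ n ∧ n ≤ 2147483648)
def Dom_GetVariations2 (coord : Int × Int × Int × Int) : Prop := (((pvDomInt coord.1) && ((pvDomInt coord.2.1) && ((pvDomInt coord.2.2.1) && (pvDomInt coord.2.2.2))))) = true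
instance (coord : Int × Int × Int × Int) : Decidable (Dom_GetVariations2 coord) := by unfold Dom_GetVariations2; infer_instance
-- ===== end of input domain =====

-- B replaces A's 16 hand-written sign patterns over 16 {0,1}-adders (256 appends, then dedup)
-- by a single comprehension over the 81 offsets in product((-1,0,1), repeat=4); objective: simpler.
-- Both Pythons end in 'list(set(out))', whose CPython iteration (hash) order PySem does not model;
-- the output is compared as a set, so both ports return the distinct elements in the same fixed
-- canonical order (sorted by the injective key pvKey below). Everything else is exact.

def pvKey (t : Int × Int × Int × Int) : Int := 512 * t.1 + 64 * t.2.1 + 8 * t.2.2.1 + t.2.2.2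

-- shared hand-port of the unmodelled 'list(set(out))' step: distinct elements, canonical order
def pvListSet (xs : List (Int × Int × Int × Int)) : List (Int × Int × Int × Int) :=
  PySem.List.sorted (PySem.Set.ofList xs) pvKey false

-- ===== PORT A =====
def GetVariations2 (coord : Int × Int × Int × Int) : List (Int × Int × Int × Int) :=
  let adders : List (Int × Int × Int × Int) :=
    ([0, 1] : List Int).flatMap fun a => ([0, 1] : List Int).flatMap fun b =>
      ([0, 1] : List Int).flatMap fun c => ([0, 1] : List Int).map fun d => (a, b, c, d)
  let out : List (Int × Int × Int × Int) := adders.foldl (fun out adder =>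
    out ++ [
      (coord.1 - adder.1, coord.2.1 - adder.2.1, coord.2.2.1 - adder.2.2.1, coord.2.2.2 - adder.2.2.2),
      (coord.1 + adder.1, coord.2.1 + adder.2.1, coord.2.2.1 + adder.2.2.1, coord.2.2.2 + adder.2.2.2),
      (coord.1 - adder.1, coord.2.1 + adder.2.1, coord.2.2.1 + adder.2.2.1, coord.2.2.2 + adder.2.2.2),
      (coord.1 + adder.1, coord.2.1 - adder.2.1, coord.2.2.1 + adder.2.2.1, coord.2.2.2 + adder.2.2.2),
      (coord.1 + adder.1, coord.2.1 + adder.2.1, coord.2.2.1 - adder.2.2.1, coord.2.2.2 + adder.2.2.2),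
      (coord.1 + adder.1, coord.2.1 + adder.2.1, coord.2.2.1 + adder.2.2.1, coord.2.2.2 - adder.2.2.2),
      (coord.1 - adder.1, coord.2.1 - adder.2.1, coord.2.2.1 + adder.2.2.1, coord.2.2.2 + adder.2.2.2),
      (coord.1 + adder.1, coord.2.1 - adder.2.1, coord.2.2.1 - adder.2.2.1, coord.2.2.2 + adder.2.2.2),
      (coord.1 + adder.1, coord.2.1 + adder.2.1, coord.2.2.1 - adder.2.2.1, coord.2.2.2 - adder.2.2.2),
      (coord.1 - adder.1, coord.2.1 + adder.2.1, coord.2.2.1 + adder.2.2.1, coord.2.2.2 - adder.2.2.2),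
      (coord.1 - adder.1, coord.2.1 + adder.2.1, coord.2.2.1 - adder.2.2.1, coord.2.2.2 + adder.2.2.2),
      (coord.1 + adder.1, coord.2.1 - adder.2.1, coord.2.2.1 + adder.2.2.1, coord.2.2.2 - adder.2.2.2),
      (coord.1 - adder.1, coord.2.1 - adder.2.1, coord.2.2.1 - adder.2.2.1, coord.2.2.2 + adder.2.2.2),
      (coord.1 - adder.1, coord.2.1 - adder.2.1, coord.2.2.1 + adder.2.2.1, coord.2.2.2 - adder.2.2.2),
      (coord.1 - adder.1, coord.2.1 + adder.2.1, coord.2.2.1 - adder.2.2.1, coord.2.2.2 - adder.2.2.2),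
      (coord.1 + adder.1, coord.2.1 - adder.2.1, coord.2.2.1 - adder.2.2.1, coord.2.2.2 - adder.2.2.2)
    ]) []
  pvListSet out

-- ===== PORT B =====
def GetVariations2_alt (coord : Int × Int × Int × Int) : List (Int × Int × Int × Int) :=
  pvListSet (([-1, 0, 1] : List Int).flatMap fun a => ([-1, 0, 1] : List Int).flatMap fun b =>
    ([-1, 0, 1] : List Int).flatMap fun c => ([-1, 0, 1] : List Int).map fun d =>
      (coord.1 + a, coord.2.1 + b, coord.2.2.1 + c, coord.2.2.2 + d))

-- ===== PRECONDITION & SPEC =====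
def Spec_GetVariations2 (coord : Int × Int × Int × Int) (out : List (Int × Int × Int × Int)) : Prop := out = GetVariations2_alt coord
instance (coord : Int × Int × Int × Int) (out : List (Int × Int × Int × Int)) : Decidable (Spec_GetVariations2 coord out) := by unfold Spec_GetVariations2; infer_instance

-- ===== CLAIM (what is proved, stated in full; the proofs are below) =====
def Claim_equal_GetVariations2 : Prop := ∀ (coord : Int × Int × Int × Int), Dom_GetVariations2 coord → Spec_GetVariations2 coord (GetVariations2 coord)

-- ===== LEMMAS AND PROOFS =====

-- translate an offset by coord
def pvTr (c o : Int × Int × Int × Int) : Int × Int × Int × Int :=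
  (c.1 + o.1, c.2.1 + o.2.1, c.2.2.1 + o.2.2.1, c.2.2.2 + o.2.2.2)

-- the 256 offsets A emits, in emission order
set_option maxHeartbeats 1000000 in
def pvOffsA : List (Int × Int × Int × Int) :=
  [(0, 0, 0, 0),
   (0, 0, 0, 0),
   (0, 0, 0, 0),
   (0, 0, 0, 0),
   (0, 0, 0, 0),
   (0, 0, 0, 0),
   (0, 0, 0, 0),
   (0, 0, 0, 0),
   (0, 0, 0, 0),
   (0, 0, 0, 0),
   (0, 0, 0, 0),
   (0, 0, 0, 0),
   (0, 0, 0, 0),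
   (0, 0, 0, 0),
   (0, 0, 0, 0),
   (0, 0, 0, 0),
   (0, 0, 0, -1),
   (0, 0, 0, 1),
   (0, 0, 0, 1),
   (0, 0, 0, 1),
   (0, 0, 0, 1),
   (0, 0, 0, -1),
   (0, 0, 0, 1),
   (0, 0, 0, 1),
   (0, 0, 0, -1),
   (0, 0, 0, -1),
   (0, 0, 0, 1),
   (0, 0, 0, -1),
   (0, 0, 0, 1),
   (0, 0, 0, -1),
   (0, 0, 0, -1),
   (0, 0, 0, -1),
   (0, 0, -1, 0),
   (0, 0, 1, 0),
   (0, 0, 1, 0),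
   (0, 0, 1, 0),
   (0, 0, -1, 0),
   (0, 0, 1, 0),
   (0, 0, 1, 0),
   (0, 0, -1, 0),
   (0, 0, -1, 0),
   (0, 0, 1, 0),
   (0, 0, -1, 0),
   (0, 0, 1, 0),
   (0, 0, -1, 0),
   (0, 0, 1, 0),
   (0, 0, -1, 0),
   (0, 0, -1, 0),
   (0, 0, -1, -1),
   (0, 0, 1, 1),
   (0, 0, 1, 1),
   (0, 0, 1, 1),
   (0, 0, -1, 1),
   (0, 0, 1, -1),
   (0, 0, 1, 1),
   (0, 0, -1, 1),
   (0, 0, -1, -1),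
   (0, 0, 1, -1),
   (0, 0, -1, 1),
   (0, 0, 1, -1),
   (0, 0, -1, 1),
   (0, 0, 1, -1),
   (0, 0, -1, -1),
   (0, 0, -1, -1),
   (0, -1, 0, 0),
   (0, 1, 0, 0),
   (0, 1, 0, 0),
   (0, -1, 0, 0),
   (0, 1, 0, 0),
   (0, 1, 0, 0),
   (0, -1, 0, 0),
   (0, -1, 0, 0),
   (0, 1, 0, 0),
   (0, 1, 0, 0),
   (0, 1, 0, 0),
   (0, -1, 0, 0),
   (0, -1, 0, 0),
   (0, -1, 0, 0),
   (0, 1, 0, 0),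
   (0, -1, 0, 0),
   (0, -1, 0, -1),
   (0, 1, 0, 1),
   (0, 1, 0, 1),
   (0, -1, 0, 1),
   (0, 1, 0, 1),
   (0, 1, 0, -1),
   (0, -1, 0, 1),
   (0, -1, 0, 1),
   (0, 1, 0, -1),
   (0, 1, 0, -1),
   (0, 1, 0, 1),
   (0, -1, 0, -1),
   (0, -1, 0, 1),
   (0, -1, 0, -1),
   (0, 1, 0, -1),
   (0, -1, 0, -1),
   (0, -1, -1, 0),
   (0, 1, 1, 0),
   (0, 1, 1, 0),
   (0, -1, 1, 0),
   (0, 1, -1, 0),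
   (0, 1, 1, 0),
   (0, -1, 1, 0),
   (0, -1, -1, 0),
   (0, 1, -1, 0),
   (0, 1, 1, 0),
   (0, 1, -1, 0),
   (0, -1, 1, 0),
   (0, -1, -1, 0),
   (0, -1, 1, 0),
   (0, 1, -1, 0),
   (0, -1, -1, 0),
   (0, -1, -1, -1),
   (0, 1, 1, 1),
   (0, 1, 1, 1),
   (0, -1, 1, 1),
   (0, 1, -1, 1),
   (0, 1, 1, -1),
   (0, -1, 1, 1),
   (0, -1, -1, 1),
   (0, 1, -1, -1),
   (0, 1, 1, -1),
   (0, 1, -1, 1),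
   (0, -1, 1, -1),
   (0, -1, -1, 1),
   (0, -1, 1, -1),
   (0, 1, -1, -1),
   (0, -1, -1, -1),
   (-1, 0, 0, 0),
   (1, 0, 0, 0),
   (-1, 0, 0, 0),
   (1, 0, 0, 0),
   (1, 0, 0, 0),
   (1, 0, 0, 0),
   (-1, 0, 0, 0),
   (1, 0, 0, 0),
   (1, 0, 0, 0),
   (-1, 0, 0, 0),
   (-1, 0, 0, 0),
   (1, 0, 0, 0),
   (-1, 0, 0, 0),
   (-1, 0, 0, 0),
   (-1, 0, 0, 0),
   (1, 0, 0, 0),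
   (-1, 0, 0, -1),
   (1, 0, 0, 1),
   (-1, 0, 0, 1),
   (1, 0, 0, 1),
   (1, 0, 0, 1),
   (1, 0, 0, -1),
   (-1, 0, 0, 1),
   (1, 0, 0, 1),
   (1, 0, 0, -1),
   (-1, 0, 0, -1),
   (-1, 0, 0, 1),
   (1, 0, 0, -1),
   (-1, 0, 0, 1),
   (-1, 0, 0, -1),
   (-1, 0, 0, -1),
   (1, 0, 0, -1),
   (-1, 0, -1, 0),
   (1, 0, 1, 0),
   (-1, 0, 1, 0),
   (1, 0, 1, 0),
   (1, 0, -1, 0),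
   (1, 0, 1, 0),
   (-1, 0, 1, 0),
   (1, 0, -1, 0),
   (1, 0, -1, 0),
   (-1, 0, 1, 0),
   (-1, 0, -1, 0),
   (1, 0, 1, 0),
   (-1, 0, -1, 0),
   (-1, 0, 1, 0),
   (-1, 0, -1, 0),
   (1, 0, -1, 0),
   (-1, 0, -1, -1),
   (1, 0, 1, 1),
   (-1, 0, 1, 1),
   (1, 0, 1, 1),
   (1, 0, -1, 1),
   (1, 0, 1, -1),
   (-1, 0, 1, 1),
   (1, 0, -1, 1),
   (1, 0, -1, -1),
   (-1, 0, 1, -1),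
   (-1, 0, -1, 1),
   (1, 0, 1, -1),
   (-1, 0, -1, 1),
   (-1, 0, 1, -1),
   (-1, 0, -1, -1),
   (1, 0, -1, -1),
   (-1, -1, 0, 0),
   (1, 1, 0, 0),
   (-1, 1, 0, 0),
   (1, -1, 0, 0),
   (1, 1, 0, 0),
   (1, 1, 0, 0),
   (-1, -1, 0, 0),
   (1, -1, 0, 0),
   (1, 1, 0, 0),
   (-1, 1, 0, 0),
   (-1, 1, 0, 0),
   (1, -1, 0, 0),
   (-1, -1, 0, 0),
   (-1, -1, 0, 0),
   (-1, 1, 0, 0),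
   (1, -1, 0, 0),
   (-1, -1, 0, -1),
   (1, 1, 0, 1),
   (-1, 1, 0, 1),
   (1, -1, 0, 1),
   (1, 1, 0, 1),
   (1, 1, 0, -1),
   (-1, -1, 0, 1),
   (1, -1, 0, 1),
   (1, 1, 0, -1),
   (-1, 1, 0, -1),
   (-1, 1, 0, 1),
   (1, -1, 0, -1),
   (-1, -1, 0, 1),
   (-1, -1, 0, -1),
   (-1, 1, 0, -1),
   (1, -1, 0, -1),
   (-1, -1, -1, 0),
   (1, 1, 1, 0),
   (-1, 1, 1, 0),
   (1, -1, 1, 0),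
   (1, 1, -1, 0),
   (1, 1, 1, 0),
   (-1, -1, 1, 0),
   (1, -1, -1, 0),
   (1, 1, -1, 0),
   (-1, 1, 1, 0),
   (-1, 1, -1, 0),
   (1, -1, 1, 0),
   (-1, -1, -1, 0),
   (-1, -1, 1, 0),
   (-1, 1, -1, 0),
   (1, -1, -1, 0),
   (-1, -1, -1, -1),
   (1, 1, 1, 1),
   (-1, 1, 1, 1),
   (1, -1, 1, 1),
   (1, 1, -1, 1),
   (1, 1, 1, -1),
   (-1, -1, 1, 1),
   (1, -1, -1, 1),
   (1, 1, -1, -1),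
   (-1, 1, 1, -1),
   (-1, 1, -1, 1),
   (1, -1, 1, -1),
   (-1, -1, -1, 1),
   (-1, -1, 1, -1),
   (-1, 1, -1, -1),
   (1, -1, -1, -1)]

-- the 81 offsets B emits, in product order (strictly increasing pvKey)
def pvOffsB : List (Int × Int × Int × Int) :=
  [(-1, -1, -1, -1),
   (-1, -1, -1, 0),
   (-1, -1, -1, 1),
   (-1, -1, 0, -1),
   (-1, -1, 0, 0),
   (-1, -1, 0, 1),
   (-1, -1, 1, -1),
   (-1, -1, 1, 0),
   (-1, -1, 1, 1),
   (-1, 0, -1, -1),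
   (-1, 0, -1, 0),
   (-1, 0, -1, 1),
   (-1, 0, 0, -1),
   (-1, 0, 0, 0),
   (-1, 0, 0, 1),
   (-1, 0, 1, -1),
   (-1, 0, 1, 0),
   (-1, 0, 1, 1),
   (-1, 1, -1, -1),
   (-1, 1, -1, 0),
   (-1, 1, -1, 1),
   (-1, 1, 0, -1),
   (-1, 1, 0, 0),
   (-1, 1, 0, 1),
   (-1, 1, 1, -1),
   (-1, 1, 1, 0),
   (-1, 1, 1, 1),
   (0, -1, -1, -1),
   (0, -1, -1, 0),
   (0, -1, -1, 1),
   (0, -1, 0, -1),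
   (0, -1, 0, 0),
   (0, -1, 0, 1),
   (0, -1, 1, -1),
   (0, -1, 1, 0),
   (0, -1, 1, 1),
   (0, 0, -1, -1),
   (0, 0, -1, 0),
   (0, 0, -1, 1),
   (0, 0, 0, -1),
   (0, 0, 0, 0),
   (0, 0, 0, 1),
   (0, 0, 1, -1),
   (0, 0, 1, 0),
   (0, 0, 1, 1),
   (0, 1, -1, -1),
   (0, 1, -1, 0),
   (0, 1, -1, 1),
   (0, 1, 0, -1),
   (0, 1, 0, 0),
   (0, 1, 0, 1),
   (0, 1, 1, -1),
   (0, 1, 1, 0),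
   (0, 1, 1, 1),
   (1, -1, -1, -1),
   (1, -1, -1, 0),
   (1, -1, -1, 1),
   (1, -1, 0, -1),
   (1, -1, 0, 0),
   (1, -1, 0, 1),
   (1, -1, 1, -1),
   (1, -1, 1, 0),
   (1, -1, 1, 1),
   (1, 0, -1, -1),
   (1, 0, -1, 0),
   (1, 0, -1, 1),
   (1, 0, 0, -1),
   (1, 0, 0, 0),
   (1, 0, 0, 1),
   (1, 0, 1, -1),
   (1, 0, 1, 0),
   (1, 0, 1, 1),
   (1, 1, -1, -1),
   (1, 1, -1, 0),
   (1, 1, -1, 1),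
   (1, 1, 0, -1),
   (1, 1, 0, 0),
   (1, 1, 0, 1),
   (1, 1, 1, -1),
   (1, 1, 1, 0),
   (1, 1, 1, 1)]

lemma pvKey_tr (c o : Int × Int × Int × Int) : pvKey (pvTr c o) = pvKey c + pvKey o := by
  simp [pvKey, pvTr]; ring

set_option maxHeartbeats 2000000 in
set_option maxRecDepth 16384 in
lemma pvA_eq (coord : Int × Int × Int × Int) :
    GetVariations2 coord = pvListSet (pvOffsA.map (pvTr coord)) := by
  simp only [GetVariations2]
  refine congrArg pvListSet ?_
  simp only [List.flatMap_cons, List.flatMap_nil, List.map_cons, List.map_nil,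
    List.append_nil, List.nil_append, List.cons_append, List.foldl_cons, List.foldl_nil]
  simp [pvOffsA, pvTr, sub_eq_add_neg]

lemma pvB_eq (coord : Int × Int × Int × Int) :
    GetVariations2_alt coord = pvListSet (pvOffsB.map (pvTr coord)) := by
  unfold GetVariations2_alt
  congr 1

lemma pvTarget_pairwise (c : Int × Int × Int × Int) :
    (pvOffsB.map (pvTr c)).Pairwise (fun a b => pvKey a < pvKey b) := by
  rw [List.pairwise_map]
  have h : pvOffsB.Pairwise (fun a b => pvKey a < pvKey b) := by decide
  exact h.imp (fun {a b} hab => by rw [pvKey_tr, pvKey_tr]; omega)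

lemma pvTarget_nodup (c : Int × Int × Int × Int) : (pvOffsB.map (pvTr c)).Nodup :=
  (pvTarget_pairwise c).imp (fun {a b} hab heq => by rw [heq] at hab; omega)

set_option maxHeartbeats 2000000 in
set_option maxRecDepth 16384 in
lemma pvMemAB : ∀ x, x ∈ pvOffsA ↔ x ∈ pvOffsB := by
  have h1 : pvOffsA.all (fun y => decide (y ∈ pvOffsB)) = true := by decide
  have h2 : pvOffsB.all (fun y => decide (y ∈ pvOffsA)) = true := by decide
  intro x
  constructor
  · intro hx; simpa using List.all_eq_true.mp h1 x hx
  · intro hx; simpa using List.all_eq_true.mp h2 x hx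

lemma pvCanon (c : Int × Int × Int × Int) (l : List (Int × Int × Int × Int))
    (hmem : ∀ x, x ∈ l ↔ x ∈ pvOffsB) :
    pvListSet (l.map (pvTr c)) = pvOffsB.map (pvTr c) := by
  unfold pvListSet
  refine PySem.List.sorted_eq_of_perm_of_pairwise_lt _ _ pvKey ?_ (pvTarget_pairwise c)
  apply (List.perm_ext_iff_of_nodup (pvTarget_nodup c) (PySem.Set.nodup_ofList _)).2
  intro x
  rw [PySem.Set.mem_ofList]
  simp only [List.mem_map]
  exact exists_congr fun o => and_congr_left' (hmem o).symm

-- ===== VERDICT (by name: the statement is the Claim_ definition above) =====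
theorem GetVariations2_spec : Claim_equal_GetVariations2 := by
  intro coord _
  unfold Spec_GetVariations2
  rw [pvA_eq, pvB_eq, pvCanon coord pvOffsA pvMemAB, pvCanon coord pvOffsB (fun x => Iff.rfl)]
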